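-- pv_equiv track=rewrite | github.com/bi0punk/repo-analyzer | src/repo_scanner_mvp/rules.py | choose_primary_candidate_branch
-- ===== SOURCE A (Python) =====
-- from typing import Iterable
--
-- PREFERRED_BRANCH_ORDER = ["dev", "develop", "main", "master"]
--
-- def choose_primary_candidate_branch(default_branch: str | None, branch_names: Iterable[str]) -> str | None:
--     names = {name.strip() for name in branch_names}
--     if default_branch and default_branch in names:
--         return default_branch
--     for candidate in PREFERRED_BRANCH_ORDER:
--         if candidate in names:
--             return candidate
--     return sorted(names)[0] if names else None
-- ===== SOURCE B (Python) =====
-- PREFERRED_BRANCH_ORDER = ["dev", "develop", "main", "master"]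
--
-- def choose_primary_candidate_branch(default_branch, branch_names):
--     names = {name.strip() for name in branch_names}
--     if default_branch and default_branch in names:
--         return default_branch
--     if not names:
--         return None
--     k = len(PREFERRED_BRANCH_ORDER)
--     def rank(n):
--         return PREFERRED_BRANCH_ORDER.index(n) if n in PREFERRED_BRANCH_ORDER else k
--     return min(names, key=lambda n: (rank(n), n))
-- ===== Notes on version B (the rewrite author's own statement) =====
-- stated objective: alternative
-- what changed: Replaces the sequential preference loop plus sorted()-based fallback with a single min-over-key pass using the lexicographic key (rank(n), n), avoiding the full sort of the names.
import Mathlib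
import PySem

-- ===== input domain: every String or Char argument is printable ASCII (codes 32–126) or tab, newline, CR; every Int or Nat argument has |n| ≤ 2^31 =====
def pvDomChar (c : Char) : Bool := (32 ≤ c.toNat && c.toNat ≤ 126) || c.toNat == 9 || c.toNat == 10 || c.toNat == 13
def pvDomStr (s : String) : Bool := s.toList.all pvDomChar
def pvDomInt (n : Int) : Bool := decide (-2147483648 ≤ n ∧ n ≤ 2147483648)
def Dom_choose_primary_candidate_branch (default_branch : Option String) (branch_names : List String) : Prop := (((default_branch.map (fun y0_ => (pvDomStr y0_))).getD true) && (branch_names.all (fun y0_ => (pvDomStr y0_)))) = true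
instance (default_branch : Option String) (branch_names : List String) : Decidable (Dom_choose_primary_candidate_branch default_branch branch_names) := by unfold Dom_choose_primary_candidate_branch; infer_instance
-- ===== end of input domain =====

-- B replaces A's sequential preference loop + sorted()[0] fallback by one min-over-key pass
-- with the lexicographic key (rank n, n); objective: alternative (no speed claim).

def pvPreferredOrder : List String := ["dev", "develop", "main", "master"]

-- ===== PORT A =====
-- the 'for candidate in PREFERRED_BRANCH_ORDER' loop; its [] case is the code after the loop:
-- 'return sorted(names)[0] if names else None'
def pvLoopA (names : PySem.Set String) : List String → Option String
  | [] => if names ≠ [] then PySem.List.pyGet? (PySem.List.sorted names (fun x => x)) 0 else none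
  | c :: rest => if PySem.Set.contains names c then some c else pvLoopA names rest

def choose_primary_candidate_branch (default_branch : Option String) (branch_names : List String) : Option String :=
  let names : PySem.Set String := PySem.Set.ofList (branch_names.map PySem.Str.strip)
  match default_branch with
  | some d => if d != "" && PySem.Set.contains names d then some d else pvLoopA names pvPreferredOrder
  | none => pvLoopA names pvPreferredOrder

-- ===== PORT B =====
-- rank(n) = PREFERRED_BRANCH_ORDER.index(n) if n in PREFERRED_BRANCH_ORDER else len(...)
def pvRank (n : String) : Nat := (PySem.List.index? pvPreferredOrder n).getD pvPreferredOrder.length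

def choose_primary_candidate_branch_alt (default_branch : Option String) (branch_names : List String) : Option String :=
  let names : PySem.Set String := PySem.Set.ofList (branch_names.map PySem.Str.strip)
  match default_branch with
  | some d =>
      if d != "" && PySem.Set.contains names d then some d
      else if names = [] then none else PySem.List.min2? names pvRank (fun n => n)
  | none => if names = [] then none else PySem.List.min2? names pvRank (fun n => n)

-- ===== PRECONDITION & SPEC =====
def Spec_choose_primary_candidate_branch (default_branch : Option String) (branch_names : List String) (out : Option String) : Prop := out = choose_primary_candidate_branch_alt default_branch branch_names
instance (default_branch : Option String) (branch_names : List String) (out : Option String) : Decidable (Spec_choose_primary_candidate_branch default_branch branch_names out) := by unfold Spec_choose_primary_candidate_branch; infer_instance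

-- ===== CLAIM (what is proved, stated in full; the proofs are below) =====
def Claim_equal_choose_primary_candidate_branch : Prop := ∀ (default_branch : Option String) (branch_names : List String), Dom_choose_primary_candidate_branch default_branch branch_names → Spec_choose_primary_candidate_branch default_branch branch_names (choose_primary_candidate_branch default_branch branch_names)

-- ===== LEMMAS AND PROOFS =====

-- the lexicographic "≤" on the key (pvRank n, n) that B minimises
def pvLe (a b : String) : Prop := pvRank a < pvRank b ∨ (pvRank a = pvRank b ∧ a ≤ b)

theorem pvLe_refl (a : String) : pvLe a a := Or.inr ⟨rfl, le_refl a⟩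

theorem pvLe_trans {a b c : String} (h1 : pvLe a b) (h2 : pvLe b c) : pvLe a c := by
  rcases h1 with h1 | ⟨e1, l1⟩ <;> rcases h2 with h2 | ⟨e2, l2⟩
  · exact Or.inl (h1.trans h2)
  · exact Or.inl (e2 ▸ h1)
  · exact Or.inl (e1 ▸ h2)
  · exact Or.inr ⟨e1.trans e2, le_trans l1 l2⟩

-- min2?'s fold step for B's key
def pvStep (acc : Option String) (x : String) : Option String :=
  match acc with
  | none => some x
  | some m =>
      if (decide (pvRank x < pvRank m) || !decide (pvRank m < pvRank x) && decide (x < m)) = true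
      then some x else some m

theorem pv_min2_eq_foldl (xs : List String) :
    PySem.List.min2? xs pvRank (fun n => n) = xs.foldl pvStep none := by
  unfold PySem.List.min2?
  congr 1
  funext acc x
  cases acc <;> rfl

theorem pv_fold_spec (t : List String) : ∀ (m : String),
    ∃ r, t.foldl pvStep (some m) = some r ∧ r ∈ m :: t ∧ ∀ y ∈ m :: t, pvLe r y := by
  induction t with
  | nil =>
      intro m
      refine ⟨m, rfl, List.mem_cons_self, ?_⟩
      intro y hy
      simp only [List.mem_singleton] at hy
      subst hy
      exact pvLe_refl _
  | cons x t ih =>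
      intro m
      have hstep : ∃ m', pvStep (some m) x = some m' ∧ (m' = x ∨ m' = m) ∧ pvLe m' x ∧ pvLe m' m := by
        unfold pvStep
        by_cases hc : (decide (pvRank x < pvRank m) || !decide (pvRank m < pvRank x) && decide (x < m)) = true
        · refine ⟨x, by show (if _ = true then some x else some m) = some x; rw [if_pos hc], Or.inl rfl, pvLe_refl x, ?_⟩
          rcases Bool.or_eq_true_iff.mp hc with h | h
          · exact Or.inl (of_decide_eq_true h)
          · obtain ⟨ha, hb⟩ := Bool.and_eq_true_iff.mp h
            have h1 : ¬ pvRank m < pvRank x := of_decide_eq_false ((Bool.not_eq_true' _) ▸ ha)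
            have h2 : x < m := of_decide_eq_true hb
            by_cases h3 : pvRank x < pvRank m
            · exact Or.inl h3
            · exact Or.inr ⟨Nat.le_antisymm (Nat.le_of_not_lt h1) (Nat.le_of_not_lt h3), le_of_lt h2⟩
        · refine ⟨m, by show (if _ = true then some x else some m) = some m; rw [if_neg hc], Or.inr rfl, ?_, pvLe_refl m⟩
          have hcf : (decide (pvRank x < pvRank m) || !decide (pvRank m < pvRank x) && decide (x < m)) = false :=
            Bool.eq_false_iff.mpr hc
          obtain ⟨hA, hB⟩ := Bool.or_eq_false_iff.mp hcf
          have h1 : ¬ pvRank x < pvRank m := of_decide_eq_false hA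
          rcases Bool.and_eq_false_iff.mp hB with hb | hb
          · have h3 : pvRank m < pvRank x := of_decide_eq_true ((Bool.not_eq_false' _) ▸ hb)
            exact Or.inl h3
          · have h2 : ¬ x < m := of_decide_eq_false hb
            by_cases h3 : pvRank m < pvRank x
            · exact Or.inl h3
            · exact Or.inr ⟨Nat.le_antisymm (Nat.le_of_not_lt h1) (Nat.le_of_not_lt h3), le_of_not_gt h2⟩
      obtain ⟨m', hm', hmem', hx, hm⟩ := hstep
      obtain ⟨r, hr, hrmem, hrle⟩ := ih m'
      refine ⟨r, by simpa [List.foldl, hm'] using hr, ?_, ?_⟩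
      · rcases List.mem_cons.mp hrmem with h | h
        · rcases hmem' with h' | h'
          · rw [h, h']; exact List.mem_cons_of_mem _ List.mem_cons_self
          · rw [h, h']; exact List.mem_cons_self
        · exact List.mem_cons_of_mem _ (List.mem_cons_of_mem _ h)
      · intro y hy
        rcases List.mem_cons.mp hy with h | hy'
        · subst h; exact pvLe_trans (hrle m' List.mem_cons_self) hm
        · rcases List.mem_cons.mp hy' with h | hy''
          · subst h; exact pvLe_trans (hrle m' List.mem_cons_self) hx
          · exact hrle y (List.mem_cons_of_mem _ hy'')

theorem pvRank_mem {r : String} (h : pvRank r ≠ 4) : r ∈ pvPreferredOrder := by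
  by_contra hm
  have hnone : PySem.List.index? pvPreferredOrder r = none := (PySem.List.index?_eq_none_iff _ _).mpr hm
  exact h (by unfold pvRank; rw [hnone]; rfl)

theorem pvRank_of_mem {r : String} (h : r ∈ pvPreferredOrder) :
    (r = "dev" ∧ pvRank r = 0) ∨ (r = "develop" ∧ pvRank r = 1) ∨
    (r = "main" ∧ pvRank r = 2) ∨ (r = "master" ∧ pvRank r = 3) := by
  simp only [pvPreferredOrder, List.mem_cons, List.not_mem_nil, or_false] at h
  rcases h with h | h | h | h <;> subst h
  · exact Or.inl ⟨rfl, by decide⟩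
  · exact Or.inr (Or.inl ⟨rfl, by decide⟩)
  · exact Or.inr (Or.inr (Or.inl ⟨rfl, by decide⟩))
  · exact Or.inr (Or.inr (Or.inr ⟨rfl, by decide⟩))

theorem pv_contains_of_mem {c : String} {xs : List String} (h : c ∈ xs) :
    PySem.Set.contains xs c = true := by
  simpa [PySem.Set.contains] using h

-- A's loop = B's min pass, over any (already-stripped) name list
theorem pv_main (names : List String) :
    pvLoopA names pvPreferredOrder
      = (if names = [] then none else PySem.List.min2? names pvRank (fun n => n)) := by
  rcases names with _ | ⟨x, t⟩
  · decide
  · simp only [if_neg (List.cons_ne_nil x t)]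
    obtain ⟨r, hr, hrmem, hrle⟩ := pv_fold_spec t x
    have hmin : PySem.List.min2? (x :: t) pvRank (fun n => n) = some r := by
      rw [pv_min2_eq_foldl]; simpa [List.foldl, pvStep] using hr
    rw [hmin]
    have hrnames : r ∈ x :: t := hrmem
    by_cases h0 : PySem.Set.contains (x :: t) "dev" = true
    · have hdev : ("dev" : String) ∈ x :: t := by simpa [PySem.Set.contains] using h0
      have hle := hrle _ hdev
      have hrk : pvRank r = 0 := by
        have : pvRank ("dev" : String) = 0 := by decide
        rcases hle with h | ⟨h, _⟩ <;> omega
      have hr' : r = "dev" := by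
        rcases pvRank_of_mem (pvRank_mem (r := r) (by omega)) with ⟨h, _⟩ | ⟨_, h⟩ | ⟨_, h⟩ | ⟨_, h⟩ <;>
          first | exact h | omega
      subst hr'
      simp only [pvPreferredOrder, pvLoopA]
      rw [if_pos h0]
    by_cases h1 : PySem.Set.contains (x :: t) "develop" = true
    · have hdev : ("develop" : String) ∈ x :: t := by simpa [PySem.Set.contains] using h1
      have hle := hrle _ hdev
      have hrk : pvRank r ≤ 1 := by
        have : pvRank ("develop" : String) = 1 := by decide
        rcases hle with h | ⟨h, _⟩ <;> omega
      have hr' : r = "develop" := by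
        rcases pvRank_of_mem (pvRank_mem (r := r) (by omega)) with ⟨h, hk⟩ | ⟨h, _⟩ | ⟨_, hk⟩ | ⟨_, hk⟩
        · exact absurd (pv_contains_of_mem (h ▸ hrnames)) h0
        · exact h
        · omega
        · omega
      subst hr'
      simp only [pvPreferredOrder, pvLoopA]
      rw [if_neg h0, if_pos h1]
    by_cases h2 : PySem.Set.contains (x :: t) "main" = true
    · have hdev : ("main" : String) ∈ x :: t := by simpa [PySem.Set.contains] using h2
      have hle := hrle _ hdev
      have hrk : pvRank r ≤ 2 := by
        have : pvRank ("main" : String) = 2 := by decide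
        rcases hle with h | ⟨h, _⟩ <;> omega
      have hr' : r = "main" := by
        rcases pvRank_of_mem (pvRank_mem (r := r) (by omega)) with ⟨h, hk⟩ | ⟨h, hk⟩ | ⟨h, _⟩ | ⟨_, hk⟩
        · exact absurd (pv_contains_of_mem (h ▸ hrnames)) h0
        · exact absurd (pv_contains_of_mem (h ▸ hrnames)) h1
        · exact h
        · omega
      subst hr'
      simp only [pvPreferredOrder, pvLoopA]
      rw [if_neg h0, if_neg h1, if_pos h2]
    by_cases h3 : PySem.Set.contains (x :: t) "master" = true
    · have hdev : ("master" : String) ∈ x :: t := by simpa [PySem.Set.contains] using h3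
      have hle := hrle _ hdev
      have hrk : pvRank r ≤ 3 := by
        have : pvRank ("master" : String) = 3 := by decide
        rcases hle with h | ⟨h, _⟩ <;> omega
      have hr' : r = "master" := by
        rcases pvRank_of_mem (pvRank_mem (r := r) (by omega)) with ⟨h, hk⟩ | ⟨h, hk⟩ | ⟨h, hk⟩ | ⟨h, _⟩
        · exact absurd (pv_contains_of_mem (h ▸ hrnames)) h0
        · exact absurd (pv_contains_of_mem (h ▸ hrnames)) h1
        · exact absurd (pv_contains_of_mem (h ▸ hrnames)) h2
        · exact h
      subst hr'
      simp only [pvPreferredOrder, pvLoopA]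
      rw [if_neg h0, if_neg h1, if_neg h2, if_pos h3]
    · -- no preferred branch in names: fallback sorted(names)[0]
      have hnopref : ∀ {y : String}, y ∈ x :: t → pvRank y = 4 := by
        intro y hy
        by_contra h
        rcases pvRank_of_mem (pvRank_mem (r := y) h) with ⟨h', _⟩ | ⟨h', _⟩ | ⟨h', _⟩ | ⟨h', _⟩
        · exact h0 (pv_contains_of_mem (h' ▸ hy))
        · exact h1 (pv_contains_of_mem (h' ▸ hy))
        · exact h2 (pv_contains_of_mem (h' ▸ hy))
        · exact h3 (pv_contains_of_mem (h' ▸ hy))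
      obtain ⟨m, sl, hms⟩ : ∃ m sl, PySem.List.sorted (x :: t) (fun x => x) = m :: sl := by
        rcases h : PySem.List.sorted (x :: t) (fun x => x) with _ | ⟨m, sl⟩
        · exact absurd ((PySem.List.sorted_eq_nil_iff _ _ _).mp h) (List.cons_ne_nil x t)
        · exact ⟨m, sl, rfl⟩
      have hmmem : m ∈ x :: t := by
        have := PySem.List.mem_sorted (xs := x :: t) (key := fun x => x) (rev := false) (x := m)
        rw [hms] at this
        exact this.mp List.mem_cons_self
      have hmle : m ≤ r := PySem.List.key_head_sorted_le _ _ hms r hrnames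
      have hrm : r ≤ m := by
        rcases hrle m hmmem with h | ⟨_, h⟩
        · exact absurd (hnopref hmmem) (by have := hnopref hrnames; omega)
        · exact h
      have hmr : m = r := le_antisymm hmle hrm
      simp only [pvPreferredOrder, pvLoopA]
      rw [if_neg h0, if_neg h1, if_neg h2, if_neg h3,
        if_pos (show (x :: t : PySem.Set String) ≠ [] from List.cons_ne_nil x t), hms,
        show (0 : Int) = ((0 : Nat) : Int) from rfl, PySem.List.pyGet?_natCast]
      simp [hmr]

-- ===== VERDICT (by name: the statement is the Claim_ definition above) =====
theorem choose_primary_candidate_branch_spec : Claim_equal_choose_primary_candidate_branch := by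
  intro db bn _
  unfold Spec_choose_primary_candidate_branch choose_primary_candidate_branch choose_primary_candidate_branch_alt
  cases db with
  | none => dsimp only; exact pv_main _
  | some d =>
      dsimp only
      by_cases h : (d != "" && PySem.Set.contains (PySem.Set.ofList (bn.map PySem.Str.strip)) d) = true
      · rw [if_pos h, if_pos h]
      · rw [if_neg h, if_neg h]
        exact pv_main _
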